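-- pv_equiv track=rewrite | github.com/algoORgoal/big-o-brownies | 백준/Gold/15685. 드래곤 커브/드래곤 커브.py | solution
-- ===== SOURCE A (Python) =====
-- def solution(n, curves):
--     matrix = [[False for j in range(101)] for i in range(101)]
--
--     for x, y, d, g in curves:
--         point = x, y
--         matrix[x][y] = True
--         path = create_path(x, y, d, g)
--         for direction in path:
--             x, y = move(point, direction)
--             matrix[x][y] = True
--
--             point = x, y
--
--     count = 0
--     for i in range(100):
--         for j in range(100):
--             if matrix[i][j] == True and matrix[i + 1][j] == True and matrix[i][j + 1] == True and matrix[i + 1][j + 1] == True: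
--                 count += 1
--
--     return count
--
-- def create_path(x, y, d, g):
--     right_table = create_table([0], {})
--     up_table = create_table([1], {})
--     left_table = create_table([2], {})
--     down_table = create_table([3], {})
--
--     if d == 0:
--         path = right_table[g]
--     elif d == 1:
--         path = up_table[g]
--     elif d == 2:
--         path = left_table[g]
--     else:
--         path = down_table[g]
--
--     return path
--
-- def move(point, direction):
--     x,  y = point
--     if direction == 0:
--         return x + 1, y
--     if direction == 1:
--         return x, y - 1
--     if direction == 2:
--         return x - 1, y
--     else:
--         return x, y + 1
--
-- def create_table(initial_path, table):
--     table[0] = initial_path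
--     for i in range(1, 11):
--         table[i] = table[i - 1] + [spin(i) for i in reversed(table[i - 1])]
--
--     return table
--
-- def spin(direction):
--     if direction == 3:
--         return 0
--     return direction + 1
-- ===== SOURCE B (Python) =====
-- def solution(n, curves):
--     grid = [[False] * 101 for _ in range(101)]
--
--     for x, y, d, g in curves:
--         points = [(x, y), move((x, y), d)]
--         for _ in range(g):
--             px, py = points[-1]
--             points += [(px - (qy - py), py + (qx - px))
--                        for qx, qy in reversed(points[:-1])]
--         for px, py in points:
--             grid[px][py] = True
--
--     return sum(1 for i in range(100) for j in range(100)
--                if grid[i][j] and grid[i + 1][j] and grid[i][j + 1] and grid[i + 1][j + 1])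
--
-- def move(point, direction):
--     x, y = point
--     if direction == 0:
--         return x + 1, y
--     if direction == 1:
--         return x, y - 1
--     if direction == 2:
--         return x - 1, y
--     return x, y + 1
-- ===== Notes on version B (the rewrite author's own statement) =====
-- stated objective: faster
-- what changed: Each curve's grid points are generated directly by geometric rotation about the last point (points += rotated reversed prefix per generation), replacing A's per-curve reconstruction of four full 11-generation direction-code tables followed by a walk; counting becomes a single sum comprehension.
import Mathlib
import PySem

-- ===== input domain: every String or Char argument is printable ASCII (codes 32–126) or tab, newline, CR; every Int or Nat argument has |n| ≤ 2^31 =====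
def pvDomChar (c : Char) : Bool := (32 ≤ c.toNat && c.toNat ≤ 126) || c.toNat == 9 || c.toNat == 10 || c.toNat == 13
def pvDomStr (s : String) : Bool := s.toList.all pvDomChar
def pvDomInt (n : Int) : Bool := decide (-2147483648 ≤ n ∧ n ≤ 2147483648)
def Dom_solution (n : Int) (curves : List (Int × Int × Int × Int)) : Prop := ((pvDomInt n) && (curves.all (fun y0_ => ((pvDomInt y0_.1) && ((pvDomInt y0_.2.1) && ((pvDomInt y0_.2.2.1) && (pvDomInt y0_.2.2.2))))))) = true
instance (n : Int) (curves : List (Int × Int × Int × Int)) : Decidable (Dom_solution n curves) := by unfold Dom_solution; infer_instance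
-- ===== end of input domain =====

-- B generates each curve's point list directly by geometric rotation about the curve's last point,
-- instead of A's per-curve reconstruction of four full 11-generation direction-code tables; measured faster.

-- Both Pythons index a 101×101 boolean list: a negative index in [-101,-1] wraps by +101 (modelled by
-- pyWrap below, used identically by both ports); an index outside [-101,100] raises IndexError and is
-- excluded by Pre_solution.
def pyWrap (i : Int) : Int := if i < 0 then i + 101 else i

-- the 101×101 boolean matrix, modelled as its (wrapped-index) membership function
def gridSet (m : (Int × Int) → Bool) (p : Int × Int) : (Int × Int) → Bool :=
  fun q => if q = p then true else m q

-- ===== PORT A =====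
def spinA (direction : Int) : Int := if direction == 3 then 0 else direction + 1

def moveA (point : Int × Int) (direction : Int) : Int × Int :=
  if direction == 0 then (point.1 + 1, point.2)
  else if direction == 1 then (point.1, point.2 - 1)
  else if direction == 2 then (point.1 - 1, point.2)
  else (point.1, point.2 + 1)

def createTableA (initialPath : List Int) (table : PySem.Dict Int (List Int)) :
    PySem.Dict Int (List Int) :=
  (PySem.List.pyRange 1 11 1).foldl
    (fun tb i => tb.insert i ((tb.getD (i - 1) []) ++ ((tb.getD (i - 1) []).reverse.map spinA)))
    (table.insert 0 initialPath)

-- table[g] raises KeyError for g outside 0..10 → those inputs are excluded by Pre_solution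
def createPathA (x y d g : Int) : List Int :=
  let rightTable := createTableA [0] PySem.Dict.empty
  let upTable := createTableA [1] PySem.Dict.empty
  let leftTable := createTableA [2] PySem.Dict.empty
  let downTable := createTableA [3] PySem.Dict.empty
  if d == 0 then rightTable.getD g []
  else if d == 1 then upTable.getD g []
  else if d == 2 then leftTable.getD g []
  else downTable.getD g []

def solution (n : Int) (curves : List (Int × Int × Int × Int)) : Int :=
  let matrix : (Int × Int) → Bool := fun _ => false
  let matrix := curves.foldl (fun m c =>
    let x := c.1; let y := c.2.1; let d := c.2.2.1; let g := c.2.2.2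
    let m := gridSet m (pyWrap x, pyWrap y)
    let path := createPathA x y d g
    (path.foldl (fun (st : ((Int × Int) → Bool) × (Int × Int)) direction =>
        let q := moveA st.2 direction
        (gridSet st.1 (pyWrap q.1, pyWrap q.2), q)) (m, (x, y))).1) matrix
  (PySem.List.pyRange 0 100 1).foldl (fun count i =>
    (PySem.List.pyRange 0 100 1).foldl (fun count j =>
      if matrix (i, j) && matrix (i + 1, j) && matrix (i, j + 1) && matrix (i + 1, j + 1)
      then count + 1 else count) count) 0

-- ===== PORT B =====
def moveB (point : Int × Int) (direction : Int) : Int × Int :=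
  if direction == 0 then (point.1 + 1, point.2)
  else if direction == 1 then (point.1, point.2 - 1)
  else if direction == 2 then (point.1 - 1, point.2)
  else (point.1, point.2 + 1)

def solution_alt (n : Int) (curves : List (Int × Int × Int × Int)) : Int :=
  let grid : (Int × Int) → Bool := fun _ => false
  let grid := curves.foldl (fun m c =>
    let x := c.1; let y := c.2.1; let d := c.2.2.1; let g := c.2.2.2
    let points := (PySem.List.pyRange 0 g 1).foldl (fun pts _ =>
        let pivot := PySem.List.pyGetD pts (-1) ((0 : Int), (0 : Int))
        pts ++ ((PySem.List.slice pts none (some (-1))).reverse.map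
          (fun q => (pivot.1 - (q.2 - pivot.2), pivot.2 + (q.1 - pivot.1)))))
      [(x, y), moveB (x, y) d]
    points.foldl (fun m p => gridSet m (pyWrap p.1, pyWrap p.2)) m) grid
  (((PySem.List.pyRange 0 100 1).flatMap (fun i =>
      (PySem.List.pyRange 0 100 1).filter (fun j =>
        grid (i, j) && grid (i + 1, j) && grid (i, j + 1) && grid (i + 1, j + 1)))).length : Int)

-- ===== PRECONDITION & SPEC =====
-- Pre_-side description of the curve (independent of both ports): the direction codes of a
-- generation-g dragon curve, and the points it visits.
def preDirs (d : Int) : Nat → List Int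
  | 0 => [d]
  | k + 1 => preDirs d k ++ (preDirs d k).reverse.map (fun e => (e + 1) % 4)

def preWalk (p : Int × Int) (L : List Int) : List (Int × Int) :=
  match L with
  | [] => [p]
  | e :: L' =>
    p :: preWalk (if e = 0 then (p.1 + 1, p.2) else if e = 1 then (p.1, p.2 - 1)
                  else if e = 2 then (p.1 - 1, p.2) else (p.1, p.2 + 1)) L'

def prePoints (x y d g : Int) : List (Int × Int) :=
  preWalk (x, y) (preDirs (if d = 0 ∨ d = 1 ∨ d = 2 then d else 3) g.toNat)

-- Pre_ excludes exactly the inputs where the Python A raises: a generation outside 0..10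
-- (KeyError on the direction table) or a curve point with a coordinate outside [-101, 100]
-- (IndexError on the 101×101 list).
def Pre_solution (n : Int) (curves : List (Int × Int × Int × Int)) : Prop :=
  (curves.all (fun c =>
    0 ≤ c.2.2.2 && c.2.2.2 ≤ 10 &&
    (prePoints c.1 c.2.1 c.2.2.1 c.2.2.2).all (fun p =>
      -101 ≤ p.1 && p.1 ≤ 100 && -101 ≤ p.2 && p.2 ≤ 100))) = true
instance (n : Int) (curves : List (Int × Int × Int × Int)) : Decidable (Pre_solution n curves) := by
  unfold Pre_solution; infer_instance

def pvWitness_solution : Int × (List (Int × Int × Int × Int)) := (2, [(50, 50, 0, 3), (40, 42, 1, 2)])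

def Spec_solution (n : Int) (curves : List (Int × Int × Int × Int)) (out : Int) : Prop := out = solution_alt n curves
instance (n : Int) (curves : List (Int × Int × Int × Int)) (out : Int) : Decidable (Spec_solution n curves out) := by unfold Spec_solution; infer_instance

-- ===== CLAIM (what is proved, stated in full; the proofs are below) =====
def Claim_equal_solution : Prop := ∀ (n : Int) (curves : List (Int × Int × Int × Int)), Dom_solution n curves → Pre_solution n curves → Spec_solution n curves (solution n curves)

-- ===== LEMMAS AND PROOFS =====
def dnorm (d : Int) : Int := if d == 0 then 0 else if d == 1 then 1 else if d == 2 then 2 else 3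

def okDir (e : Int) : Prop := e = 0 ∨ e = 1 ∨ e = 2 ∨ e = 3

def padd (p v : Int × Int) : Int × Int := (p.1 + v.1, p.2 + v.2)

def rotAbout (c q : Int × Int) : Int × Int := (c.1 - (q.2 - c.2), c.2 + (q.1 - c.1))

def walkPts (p : Int × Int) (L : List Int) : List (Int × Int) :=
  match L with
  | [] => []
  | e :: L' => moveA p e :: walkPts (moveA p e) L'

def dseq (d : Int) : Nat → List Int
  | 0 => [d]
  | k + 1 => dseq d k ++ (dseq d k).reverse.map spinA

theorem moveB_eq_moveA : moveB = moveA := rfl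

theorem moveA_dnorm (p : Int × Int) (e : Int) : moveA p (dnorm e) = moveA p e := by
  simp only [moveA, dnorm]; split_ifs <;> simp_all

theorem okDir_dnorm (d : Int) : okDir (dnorm d) := by
  simp only [dnorm, okDir]; split_ifs <;> simp_all

theorem okDir_spinA {e : Int} (h : okDir e) : okDir (spinA e) := by
  rcases h with h | h | h | h <;> subst h <;> simp [spinA, okDir]

theorem dseq_ok {d : Int} (hd : okDir d) : ∀ k, ∀ e ∈ dseq d k, okDir e := by
  intro k
  induction k with
  | zero => intro e he; simp [dseq] at he; subst he; exact hd
  | succ k ih =>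
    intro e he
    simp only [dseq, List.mem_append, List.mem_map, List.mem_reverse] at he
    rcases he with he | ⟨f, hf, rfl⟩
    · exact ih e he
    · exact okDir_spinA (ih f hf)

theorem walkPts_append (p : Int × Int) (L1 L2 : List Int) :
    walkPts p (L1 ++ L2) = walkPts p L1 ++ walkPts (L1.foldl moveA p) L2 := by
  induction L1 generalizing p with
  | nil => simp [walkPts]
  | cons e L1 ih => simp [walkPts, ih]

theorem moveA_padd (p v : Int × Int) (e : Int) :
    moveA (padd p v) e = padd (moveA p e) v := by
  simp only [moveA, padd]; split_ifs <;> simp [Prod.ext_iff] <;> ring_nf <;> omega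

theorem walkPts_padd (p v : Int × Int) (L : List Int) :
    walkPts (padd p v) L = (walkPts p L).map (fun q => padd q v) := by
  induction L generalizing p with
  | nil => simp [walkPts]
  | cons e L ih => simp [walkPts, moveA_padd, ih]

-- shifting the pivot of the rotation is a translation
theorem rotAbout_shift (c p x : Int × Int) :
    padd (rotAbout p x) ((rotAbout c p).1 - p.1, (rotAbout c p).2 - p.2) = rotAbout c x := by
  simp only [rotAbout, padd, Prod.ext_iff]; constructor <;> ring

theorem getLast_walkPts (p : Int × Int) (L : List Int) :
    (p :: walkPts p L).getLast (by simp) = L.foldl moveA p := by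
  induction L generalizing p with
  | nil => simp [walkPts]
  | cons e L ih => simpa [walkPts, List.getLast] using ih (moveA p e)

-- one fold step, pointwise: the first newly-walked point is the second-to-last old point rotated
theorem moveA_spinA_rot (pm : Int × Int) (e : Int) (he : okDir e) :
    moveA (moveA pm e) (spinA e) = rotAbout (moveA pm e) pm := by
  rcases he with h | h | h | h <;> subst h <;>
    simp [moveA, spinA, rotAbout, Prod.ext_iff] <;> ring_nf <;> omega

-- the heart: walking the spun, reversed direction list from the end point retraces the previous
-- points, rotated about that end point, in reverse order
theorem walk_spin (L : List Int) (p : Int × Int) (hL : ∀ e ∈ L, okDir e) :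
    walkPts (L.foldl moveA p) (L.reverse.map spinA)
      = ((p :: walkPts p L).dropLast).reverse.map (rotAbout (L.foldl moveA p)) := by
  induction L using List.reverseRecOn generalizing p with
  | nil => simp [walkPts]
  | append_singleton M e ih =>
    have hM : ∀ f ∈ M, okDir f := fun f hf => hL f (by simp [hf])
    have he : okDir e := hL e (by simp)
    have hfold : (M ++ [e]).foldl moveA p = moveA (M.foldl moveA p) e := by
      simp [List.foldl_append]
    have hwalk : walkPts p (M ++ [e]) = walkPts p M ++ [moveA (M.foldl moveA p) e] := by
      rw [walkPts_append]; rfl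
    have hne : (p :: walkPts p M) ≠ [] := by simp
    have hsplit : (p :: walkPts p M).dropLast ++ [M.foldl moveA p] = p :: walkPts p M := by
      conv_rhs => rw [← List.dropLast_concat_getLast hne]
      rw [getLast_walkPts]
    rw [hfold, hwalk]
    have hrev : (M ++ [e]).reverse.map spinA = spinA e :: M.reverse.map spinA := by
      simp
    rw [hrev]
    have hdrop : (p :: (walkPts p M ++ [moveA (M.foldl moveA p) e])).dropLast
        = p :: walkPts p M := by
      rw [show p :: (walkPts p M ++ [moveA (M.foldl moveA p) e])
            = (p :: walkPts p M) ++ [moveA (M.foldl moveA p) e] by simp,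
          List.dropLast_concat]
    rw [hdrop]
    conv_rhs => rw [← hsplit]
    rw [List.reverse_append]
    simp only [List.reverse_cons, List.reverse_nil, List.nil_append, List.singleton_append,
      List.map_cons]
    set pm := M.foldl moveA p with hpm
    set pivot := moveA pm e with hpivot
    show moveA pivot (spinA e) :: walkPts (moveA pivot (spinA e)) (M.reverse.map spinA)
        = rotAbout pivot pm :: ((p :: walkPts p M).dropLast).reverse.map (rotAbout pivot)
    rw [moveA_spinA_rot pm e he]
    congr 1
    have hq : rotAbout pivot pm
        = padd pm ((rotAbout pivot pm).1 - pm.1, (rotAbout pivot pm).2 - pm.2) := by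
      simp [padd]
    rw [hq, walkPts_padd, ih p hM, List.map_map]
    refine List.map_congr_left (fun x _ => ?_)
    exact rotAbout_shift pivot pm x

theorem ptsB_step (p : Int × Int) (d : Int) (hd : okDir d) (k : Nat) :
    p :: walkPts p (dseq d (k + 1))
      = (p :: walkPts p (dseq d k)) ++
        ((p :: walkPts p (dseq d k)).dropLast).reverse.map
          (rotAbout (PySem.List.pyGetD (p :: walkPts p (dseq d k)) (-1) ((0 : Int), (0 : Int)))) := by
  have hne : (p :: walkPts p (dseq d k)) ≠ [] := by simp
  rw [PySem.List.pyGetD_neg_one _ _ hne, getLast_walkPts]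
  show p :: walkPts p (dseq d k ++ (dseq d k).reverse.map spinA) = _
  rw [walkPts_append, walk_spin (dseq d k) p (dseq_ok hd k)]
  simp

theorem ptsB_eq (p : Int × Int) (d : Int) (g : Int) (hg : 0 ≤ g) :
    (PySem.List.pyRange 0 g 1).foldl
      (fun pts _ =>
        pts ++
          (PySem.List.slice pts none (some (-1))).reverse.map
            (fun q =>
              ((PySem.List.pyGetD pts (-1) ((0 : Int), (0 : Int))).1 -
                  (q.2 - (PySem.List.pyGetD pts (-1) ((0 : Int), (0 : Int))).2),
                (PySem.List.pyGetD pts (-1) ((0 : Int), (0 : Int))).2 +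
                  (q.1 - (PySem.List.pyGetD pts (-1) ((0 : Int), (0 : Int))).1))))
      [p, moveB p d]
      = p :: walkPts p (dseq (dnorm d) g.toNat) := by
  obtain ⟨k, rfl⟩ := Int.eq_ofNat_of_zero_le hg
  rw [Int.toNat_natCast]
  clear hg
  induction k with
  | zero =>
    rw [PySem.List.pyRange_one_eq_nil (by simp)]
    show [p, moveB p d] = p :: walkPts p [dnorm d]
    simp [walkPts, moveB_eq_moveA, moveA_dnorm]
  | succ k ih =>
    rw [show ((k + 1 : Nat) : Int) = ((k : Nat) : Int) + 1 by push_cast; ring,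
      PySem.List.pyRange_one_succ_right (by positivity), List.foldl_append, ih]
    simp only [List.foldl_cons, List.foldl_nil, PySem.List.slice_to_neg_one]
    exact (ptsB_step p (dnorm d) (okDir_dnorm d) k).symm

theorem table_inv (d0 : Int) : ∀ (m : Nat), ∀ j : Nat, j ≤ m →
    ((PySem.List.pyRange 1 ((m : Int) + 1) 1).foldl
      (fun tb i => tb.insert i ((tb.getD (i - 1) []) ++ ((tb.getD (i - 1) []).reverse.map spinA)))
      (PySem.Dict.empty.insert 0 [d0])).getD (j : Int) [] = dseq d0 j := by
  intro m
  induction m with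
  | zero =>
    intro j hj
    interval_cases j
    rw [PySem.List.pyRange_one_eq_nil (by omega)]
    simp only [List.foldl_nil, Nat.cast_zero]
    rw [PySem.Dict.getD_insert_self]
    rfl
  | succ m ih =>
    intro j hj
    rw [show ((m + 1 : Nat) : Int) + 1 = (((m : Int) + 1) + 1) by push_cast; ring,
      PySem.List.pyRange_one_succ_right (by omega), List.foldl_append, List.foldl_cons,
      List.foldl_nil]
    by_cases hjm : j = m + 1
    · subst hjm
      rw [show ((m + 1 : Nat) : Int) = (m : Int) + 1 by push_cast; ring,
        PySem.Dict.getD_insert_self, add_sub_cancel_right, ih m le_rfl]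
      rfl
    · have hne : (j : Int) ≠ (m : Int) + 1 := by omega
      rw [PySem.Dict.getD_insert_of_ne _ _ _ hne]
      exact ih j (by omega)

theorem table_getD (d0 : Int) (k : Nat) (hk : k ≤ 10) :
    (createTableA [d0] PySem.Dict.empty).getD (k : Int) [] = dseq d0 k := by
  have h := table_inv d0 10 k hk
  rw [show ((10 : Nat) : Int) + 1 = 11 by norm_num] at h
  exact h

theorem createPathA_eq (x y d g : Int) (h0 : 0 ≤ g) (h10 : g ≤ 10) :
    createPathA x y d g = dseq (dnorm d) g.toNat := by
  have hk : g.toNat ≤ 10 := by omega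
  have hg : ((g.toNat : Nat) : Int) = g := Int.toNat_of_nonneg h0
  simp only [createPathA, dnorm]
  split_ifs with h1 h2 h3 <;>
    · first
      | (have h := table_getD 0 g.toNat hk; rw [hg] at h; exact h)
      | (have h := table_getD 1 g.toNat hk; rw [hg] at h; exact h)
      | (have h := table_getD 2 g.toNat hk; rw [hg] at h; exact h)
      | (have h := table_getD 3 g.toNat hk; rw [hg] at h; exact h)

-- A's marking fold, with its carried current point, is a plain fold over the visited points
theorem markA_fold (path : List Int) (m : (Int × Int) → Bool) (p : Int × Int) :
    (path.foldl (fun (st : ((Int × Int) → Bool) × (Int × Int)) direction =>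
        (gridSet st.1 (pyWrap (moveA st.2 direction).1, pyWrap (moveA st.2 direction).2),
          moveA st.2 direction)) (m, p)).1
      = (walkPts p path).foldl (fun m q => gridSet m (pyWrap q.1, pyWrap q.2)) m := by
  induction path generalizing m p with
  | nil => rfl
  | cons e L ih => simp only [walkPts, List.foldl_cons]; exact ih _ _

theorem foldl_count_filter {α : Type} (l : List α) (p : α → Bool) (c : Int) :
    l.foldl (fun cnt x => if p x then cnt + 1 else cnt) c = c + ((l.filter p).length : Int) := by
  induction l generalizing c with
  | nil => simp
  | cons x l ih =>
    simp only [List.foldl_cons, List.filter_cons]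
    split_ifs with h <;> simp [h, ih] <;> push_cast <;> ring

theorem foldl_add_length {α β : Type} (l : List α) (f : α → List β) (c : Int) :
    l.foldl (fun cnt i => cnt + ((f i).length : Int)) c = c + ((l.flatMap f).length : Int) := by
  induction l generalizing c with
  | nil => simp
  | cons x l ih => simp [List.foldl_cons, ih]; push_cast; ring

def marksA (curves : List (Int × Int × Int × Int)) : (Int × Int) → Bool :=
  List.foldl
      (fun (m : (Int × Int) → Bool) (c : Int × Int × Int × Int) =>
        (List.foldl
          (fun (st : ((Int × Int) → Bool) × (Int × Int)) (direction : Int) =>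
            (gridSet st.1 (pyWrap (moveA st.2 direction).1, pyWrap (moveA st.2 direction).2),
              moveA st.2 direction))
          (gridSet m (pyWrap c.1, pyWrap c.2.1), (c.1, c.2.1))
          (createPathA c.1 c.2.1 c.2.2.1 c.2.2.2)).1)
      (fun _ => false) curves

def marksB (curves : List (Int × Int × Int × Int)) : (Int × Int) → Bool :=
  List.foldl
      (fun (m : (Int × Int) → Bool) (c : Int × Int × Int × Int) =>
        List.foldl (fun m p => gridSet m (pyWrap p.1, pyWrap p.2)) m
          (List.foldl
            (fun pts _ =>
        pts ++
          (PySem.List.slice pts none (some (-1))).reverse.map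
            (fun q =>
              ((PySem.List.pyGetD pts (-1) ((0 : Int), (0 : Int))).1 -
                  (q.2 - (PySem.List.pyGetD pts (-1) ((0 : Int), (0 : Int))).2),
                (PySem.List.pyGetD pts (-1) ((0 : Int), (0 : Int))).2 +
                  (q.1 - (PySem.List.pyGetD pts (-1) ((0 : Int), (0 : Int))).1))))
            [(c.1, c.2.1), moveB (c.1, c.2.1) c.2.2.1]
            (PySem.List.pyRange 0 c.2.2.2 1)))
      (fun _ => false) curves

def countA (mf : (Int × Int) → Bool) : Int :=
  (PySem.List.pyRange 0 100 1).foldl (fun count i =>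
    (PySem.List.pyRange 0 100 1).foldl (fun count j =>
      if mf (i, j) && mf (i + 1, j) && mf (i, j + 1) && mf (i + 1, j + 1)
      then count + 1 else count) count) 0

def countB (mf : (Int × Int) → Bool) : Int :=
  (((PySem.List.pyRange 0 100 1).flatMap (fun i =>
      (PySem.List.pyRange 0 100 1).filter (fun j =>
        mf (i, j) && mf (i + 1, j) && mf (i, j + 1) && mf (i + 1, j + 1)))).length : Int)

theorem count_fold_eq (mf : (Int × Int) → Bool) : countA mf = countB mf := by
  unfold countA countB
  rw [PySem.List.foldl_congr_mem _ _ (fun count i =>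
      count + (((PySem.List.pyRange 0 100 1).filter (fun j =>
        mf (i, j) && mf (i + 1, j) && mf (i, j + 1) && mf (i + 1, j + 1))).length : Int)) 0
    (fun acc i _ => foldl_count_filter _ _ acc)]
  rw [foldl_add_length, zero_add]

theorem marks_eq (curves : List (Int × Int × Int × Int))
    (h : ∀ c ∈ curves, 0 ≤ c.2.2.2 ∧ c.2.2.2 ≤ 10) : marksA curves = marksB curves := by
  unfold marksA marksB
  refine PySem.List.foldl_congr_mem curves _ _ _ (fun m c hc => ?_)
  obtain ⟨hg0, hg10⟩ := h c hc
  rw [markA_fold, createPathA_eq _ _ _ _ hg0 hg10,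
    ptsB_eq (c.1, c.2.1) c.2.2.1 c.2.2.2 hg0, List.foldl_cons]

-- ===== VERDICT (by name: the statement is the Claim_ definition above) =====
set_option maxRecDepth 16000 in
set_option maxHeartbeats 1000000 in
theorem solution_spec : Claim_equal_solution := by
  intro n curves hdom hpre
  have hcurves : ∀ c ∈ curves, 0 ≤ c.2.2.2 ∧ c.2.2.2 ≤ 10 := by
    intro c hc
    unfold Pre_solution at hpre
    have h := (List.all_eq_true.mp hpre) c hc
    simp only [Bool.and_eq_true, decide_eq_true_eq] at h
    exact ⟨h.1.1, h.1.2⟩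
  show countA (marksA curves) = countB (marksB curves)
  rw [marks_eq curves hcurves, count_fold_eq]
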